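-- pv_equiv track=rewrite | github.com/Kapust/tacotron2 | text/symbols.py | get_valid_symbol_ids
-- ===== SOURCE A (Python) =====
-- _kirciuotos_raides = {
-- "a" :  ["a`","a~","a^"],
-- "ą" : ["ą~","ą^"],
-- "e" : ["e`","e~","e^"],
-- "ę" : ["ę~","ę^"],
-- "ė" : ["ė~","ė^"],
-- "i" : ["i`","i~","i^"],
-- "į" : ["į~","į^"],
-- "y" : ["y~","y^"],
-- "o" : ["o`","o~","o^"],
-- "u" : ["u`","u~","u^"],
-- "ų" : ["ų~","ų^"],
-- "ū" : ["ū~","ū^"],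
-- "l" : ["l~"],
-- "m" : ["m~"],
-- "n" : ["n~"],
-- "r" : ["r~"]
-- }
--
-- _fonemos = {
-- 'regular' :['į', 'ų', 'c', 'č'],
-- 'accent' : ['ą~','ą^','ę~','ę^','i^','į','į~','į^','u^','ų','ų~','ų^','c','č'],
-- 'add' : ['ch']
-- }
--
-- def get_valid_symbol_ids(cleaners):
-- 	_simboliai = ' ?!.'
-- 	_balsiai = 'AaĄąEeĘęĖėIiĮįYyOoUuŲųŪū'
-- 	_priebalsiai_sprogstamieji = 'BbDdGgPpTtKk'
-- 	_priebalsiai_snypsciantieji = 'CcČčSsŠšZzŽžFfHh'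
-- 	_priebalsiai_kiti = 'JjLlMmNnRrVv'
-- 	_kirciai = '~^`'
--
-- 	_raidynas = _balsiai + _priebalsiai_sprogstamieji + _priebalsiai_snypsciantieji + _priebalsiai_kiti
--
-- 	if "lowercase" in cleaners:
-- 		_raidynas = ''.join([x[0] for x in zip(_raidynas, _raidynas.upper()) if x[0] != x[1]])
--
-- 	if "accent_chars" in cleaners:
-- 		_raidynas += _kirciai
--
-- 	_raidynas = list(_raidynas) + list(_simboliai)
--
-- 	if "accent_letters" in cleaners:
-- 		for raide in _raidynas:
-- 			if raide in _kirciuotos_raides: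
-- 				insert_index = _raidynas.index(raide) + 1
-- 				if "lowercase" not in cleaners:
-- 					kirciuotos_su_didz = []
-- 					for kirciuota_raide in _kirciuotos_raides[raide]:
-- 						kirciuotos_su_didz.append(kirciuota_raide.upper())
-- 						kirciuotos_su_didz.append(kirciuota_raide)
-- 					_raidynas[insert_index:insert_index] = kirciuotos_su_didz
-- 				else:
-- 					_raidynas[insert_index:insert_index] = _kirciuotos_raides[raide]
--
-- 	if "phonemes" in cleaners:
-- 		if "accent_letters" in cleaners:
-- 			_raidynas = [x for x in _raidynas if x.lower() not in _fonemos['accent']]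
-- 		else:
-- 			_raidynas = [x for x in _raidynas if x.lower() not in _fonemos['regular']]
-- 		insert_index = _raidynas.index('h') + 1
-- 		_raidynas[insert_index:insert_index] = _fonemos['add']
--
-- 	return _raidynas
-- ===== SOURCE B (Python) =====
-- _kirciuotos_raides = {
-- "a" :  ["a`","a~","a^"],
-- "ą" : ["ą~","ą^"],
-- "e" : ["e`","e~","e^"],
-- "ę" : ["ę~","ę^"],
-- "ė" : ["ė~","ė^"],
-- "i" : ["i`","i~","i^"],
-- "į" : ["į~","į^"],
-- "y" : ["y~","y^"],
-- "o" : ["o`","o~","o^"],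
-- "u" : ["u`","u~","u^"],
-- "ų" : ["ų~","ų^"],
-- "ū" : ["ū~","ū^"],
-- "l" : ["l~"],
-- "m" : ["m~"],
-- "n" : ["n~"],
-- "r" : ["r~"]
-- }
--
-- _fonemos = {
-- 'regular' :['į', 'ų', 'c', 'č'],
-- 'accent' : ['ą~','ą^','ę~','ę^','i^','į','į~','į^','u^','ų','ų~','ų^','c','č'],
-- 'add' : ['ch']
-- }
--
-- def _accented(s, with_upper):
--     forms = _kirciuotos_raides.get(s)
--     if forms is None:
--         return [s]
--     out = [s]
--     for f in forms:
--         if with_upper: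
--             out.append(f.upper())
--         out.append(f)
--     return out
--
-- def get_valid_symbol_ids(cleaners):
--     lc = "lowercase" in cleaners
--     letters = 'AaĄąEeĘęĖėIiĮįYyOoUuŲųŪūBbDdGgPpTtKkCcČčSsŠšZzŽžFfHhJjLlMmNnRrVv'
--     if lc:
--         # alphabet alternates Upper,lower pairs, so the lowercase letters sit at odd indices
--         letters = letters[1::2]
--     if "accent_chars" in cleaners:
--         letters += '~^`'
--     symbols = list(letters + ' ?!.')
--     if "accent_letters" in cleaners:
--         symbols = [t for s in symbols for t in _accented(s, not lc)]
--     if "phonemes" in cleaners: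
--         skip = _fonemos['accent'] if "accent_letters" in cleaners else _fonemos['regular']
--         out = []
--         for x in symbols:
--             if x.lower() not in skip:
--                 out.append(x)
--                 if x == 'h':
--                     out.extend(_fonemos['add'])
--         symbols = out
--     return symbols
-- ===== Notes on version B (the rewrite author's own statement) =====
-- stated objective: simpler
-- what changed: B replaces A's in-place mutation with a constructive build: lowercase filtering becomes a stride slice letters[1::2] over the Upper/lower-paired alphabet (instead of a zip/compare pass), accent expansion is a flat one-pass expansion of each symbol into itself plus its accented forms (instead of iterating over a list mutated by .index + slice assignment), and the phonemes stage is a single pass that filters and emits 'ch' right after 'h' (instead of filter, .index and slice assignment).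
import Mathlib
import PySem

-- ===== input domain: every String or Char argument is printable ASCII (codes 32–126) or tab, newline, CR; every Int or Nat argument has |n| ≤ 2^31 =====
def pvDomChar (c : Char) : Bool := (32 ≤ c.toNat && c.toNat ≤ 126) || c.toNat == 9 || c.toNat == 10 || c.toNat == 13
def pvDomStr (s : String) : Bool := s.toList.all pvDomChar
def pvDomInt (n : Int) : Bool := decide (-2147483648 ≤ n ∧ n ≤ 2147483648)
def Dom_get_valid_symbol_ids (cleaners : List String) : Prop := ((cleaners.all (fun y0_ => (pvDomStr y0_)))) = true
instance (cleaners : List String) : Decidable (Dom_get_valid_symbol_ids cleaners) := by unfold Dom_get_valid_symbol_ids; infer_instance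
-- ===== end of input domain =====

-- B builds the symbol list constructively (stride slice for lowercase, one-pass accent expansion,
-- single filter-and-emit pass for phonemes) instead of A's in-place .index/slice-assignment
-- mutation; objective: simpler.

-- ===== PORT A =====
-- Python str.upper()/str.lower() ported by hand char-by-char; exact for ASCII and for the
-- Lithuanian letters ĄąĘęĖėĮįŲųŪūČčŠšŽž that occur in this module's constants.
def liUpperChar (c : Char) : Char :=
  if 'a' ≤ c ∧ c ≤ 'z' then Char.ofNat (c.toNat - 32)
  else if c = 'ą' then 'Ą' else if c = 'ę' then 'Ę' else if c = 'ė' then 'Ė'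
  else if c = 'į' then 'Į' else if c = 'ų' then 'Ų' else if c = 'ū' then 'Ū'
  else if c = 'č' then 'Č' else if c = 'š' then 'Š' else if c = 'ž' then 'Ž' else c

def liLowerChar (c : Char) : Char :=
  if 'A' ≤ c ∧ c ≤ 'Z' then Char.ofNat (c.toNat + 32)
  else if c = 'Ą' then 'ą' else if c = 'Ę' then 'ę' else if c = 'Ė' then 'ė'
  else if c = 'Į' then 'į' else if c = 'Ų' then 'ų' else if c = 'Ū' then 'ū'
  else if c = 'Č' then 'č' else if c = 'Š' then 'š' else if c = 'Ž' then 'ž' else c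

def liUpper (s : String) : String := String.mk (s.toList.map liUpperChar)
def liLower (s : String) : String := String.mk (s.toList.map liLowerChar)

-- module-level dict _kirciuotos_raides as an association list (insertion order, first match)
def kirciuotosRaides : List (String × List String) :=
  [ ("a", ["a`","a~","a^"]), ("ą", ["ą~","ą^"]), ("e", ["e`","e~","e^"]),
    ("ę", ["ę~","ę^"]), ("ė", ["ė~","ė^"]), ("i", ["i`","i~","i^"]),
    ("į", ["į~","į^"]), ("y", ["y~","y^"]), ("o", ["o`","o~","o^"]),
    ("u", ["u`","u~","u^"]), ("ų", ["ų~","ų^"]), ("ū", ["ū~","ū^"]),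
    ("l", ["l~"]), ("m", ["m~"]), ("n", ["n~"]), ("r", ["r~"]) ]

def kirGet? (s : String) : Option (List String) :=
  (kirciuotosRaides.find? (fun p => p.1 == s)).map (·.2)

def fonemosRegular : List String := ["į", "ų", "c", "č"]
def fonemosAccent : List String :=
  ["ą~","ą^","ę~","ę^","i^","į","į~","į^","u^","ų","ų~","ų^","c","č"]
def fonemosAdd : List String := ["ch"]

-- Python's for-loop over the list _raidynas while it is being mutated in place: iteration is by
-- index; fuel only makes the recursion total (it is always sufficient: at most 66 insertions).
def aAccentLoop (fuel : Nat) (i : Nat) (lowercase : Bool) (xs : List String) : List String :=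
  match fuel with
  | 0 => xs
  | fuel + 1 =>
    if h : i < xs.length then
      let raide := xs[i]
      match kirGet? raide with
      | some vals =>
        -- insert_index = _raidynas.index(raide) + 1 ; raide is in xs so idxOf is its .index
        let insertIndex := xs.idxOf raide + 1
        let ins := if lowercase then vals
                   else vals.foldl (fun acc k => acc ++ [liUpper k, k]) []
        aAccentLoop fuel (i + 1) lowercase (xs.take insertIndex ++ ins ++ xs.drop insertIndex)
      | none => aAccentLoop fuel (i + 1) lowercase xs
    else xs

def get_valid_symbol_ids (cleaners : List String) : List String :=
  let simboliai := " ?!."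
  let balsiai := "AaĄąEeĘęĖėIiĮįYyOoUuŲųŪū"
  let sprogstamieji := "BbDdGgPpTtKk"
  let snypsciantieji := "CcČčSsŠšZzŽžFfHh"
  let kiti := "JjLlMmNnRrVv"
  let kirciai := "~^`"
  let raidynas := balsiai ++ sprogstamieji ++ snypsciantieji ++ kiti
  let raidynas :=
    if cleaners.contains "lowercase" then
      String.mk ((((raidynas.toList).zip ((raidynas.toList).map liUpperChar)).filter
        (fun x => x.1 != x.2)).map (·.1))
    else raidynas
  let raidynas := if cleaners.contains "accent_chars" then raidynas ++ kirciai else raidynas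
  let lst : List String :=
    raidynas.toList.map (fun c => String.mk [c]) ++ simboliai.toList.map (fun c => String.mk [c])
  let lst :=
    if cleaners.contains "accent_letters" then
      aAccentLoop (lst.length + 100) 0 (cleaners.contains "lowercase") lst
    else lst
  if cleaners.contains "phonemes" then
    let lst :=
      if cleaners.contains "accent_letters" then
        lst.filter (fun x => !(fonemosAccent.contains (liLower x)))
      else lst.filter (fun x => !(fonemosRegular.contains (liLower x)))
    -- 'h' always survives the filters, so .index never raises; idxOf is its value
    let insertIndex := lst.idxOf "h" + 1
    lst.take insertIndex ++ fonemosAdd ++ lst.drop insertIndex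
  else lst

-- ===== PORT B =====
-- letters[1::2]: hand-ported (PySem slices cover no step); exact for step 2 from index 1.
def bOddPositions : List Char → List Char
  | _ :: b :: rest => b :: bOddPositions rest
  | _ => []

-- _accented(s, with_upper): the symbol itself followed by its accented forms
def bAccented (withUpper : Bool) (s : String) : List String :=
  match kirGet? s with
  | none => [s]
  | some forms =>
    forms.foldl (fun out f => (if withUpper then out ++ [liUpper f] else out) ++ [f]) [s]

-- the phonemes loop: skip banned symbols, emit 'ch' right after 'h'
def bPhonePass (skip : List String) : List String → List String
  | [] => []
  | x :: rest =>
    if skip.contains (liLower x) then bPhonePass skip rest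
    else x :: (if x == "h" then fonemosAdd else []) ++ bPhonePass skip rest

def get_valid_symbol_ids_alt (cleaners : List String) : List String :=
  let lc := cleaners.contains "lowercase"
  let letters := "AaĄąEeĘęĖėIiĮįYyOoUuŲųŪūBbDdGgPpTtKkCcČčSsŠšZzŽžFfHhJjLlMmNnRrVv".toList
  let letters := if lc then bOddPositions letters else letters
  let letters := if cleaners.contains "accent_chars" then letters ++ "~^`".toList else letters
  let symbols := (letters ++ " ?!.".toList).map (fun c => String.mk [c])
  let symbols :=
    if cleaners.contains "accent_letters" then symbols.flatMap (bAccented (!lc)) else symbols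
  if cleaners.contains "phonemes" then
    bPhonePass (if cleaners.contains "accent_letters" then fonemosAccent else fonemosRegular)
      symbols
  else symbols

-- ===== PRECONDITION & SPEC =====
def Spec_get_valid_symbol_ids (cleaners : List String) (out : List String) : Prop := out = get_valid_symbol_ids_alt cleaners
instance (cleaners : List String) (out : List String) : Decidable (Spec_get_valid_symbol_ids cleaners out) := by unfold Spec_get_valid_symbol_ids; infer_instance

-- ===== CLAIM =====
def Claim_equal_get_valid_symbol_ids : Prop := ∀ (cleaners : List String), Dom_get_valid_symbol_ids cleaners → Spec_get_valid_symbol_ids cleaners (get_valid_symbol_ids cleaners)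

-- ===== LEMMAS AND PROOFS =====
-- Both programs depend on `cleaners` only through the four membership tests; split on them.
set_option maxRecDepth 100000 in
set_option maxHeartbeats 4000000 in
theorem get_valid_both_eq (cleaners : List String) :
    get_valid_symbol_ids cleaners = get_valid_symbol_ids_alt cleaners := by
  cases h1 : cleaners.contains "lowercase" <;>
  cases h2 : cleaners.contains "accent_chars" <;>
  cases h3 : cleaners.contains "accent_letters" <;>
  cases h4 : cleaners.contains "phonemes" <;>
    simp only [get_valid_symbol_ids, get_valid_symbol_ids_alt, h1, h2, h3, h4] <;> decide

-- ===== VERDICT =====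
theorem get_valid_symbol_ids_spec : Claim_equal_get_valid_symbol_ids := by
  intro cleaners _
  unfold Spec_get_valid_symbol_ids
  exact get_valid_both_eq cleaners
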